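-- pv_equiv track=rewrite | github.com/GGBon6/Soul-Companion-Cabin | esp-ai-server/app/shared/cache/cache_utils.py | is_cache_key_valid
-- ===== SOURCE A (Python) =====
-- def is_cache_key_valid(key: str) -> bool:
--     """验证缓存键是否有效"""
--     if not key or not isinstance(key, str):
--         return False
--
--     # 检查长度
--     if len(key) > 250:  # Redis键长度限制
--         return False
--
--     # 检查字符
--     invalid_chars = [' ', '\n', '\r', '\t']
--     for char in invalid_chars:
--         if char in key:
--             return False
--
--     return True
-- ===== SOURCE B (Python) =====
-- def is_cache_key_valid(key: str) -> bool:
--     if not key or not isinstance(key, str):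
--         return False
--     if len(key) > 250:
--         return False
--     forbidden = {' ', '\n', '\r', '\t'}
--     for ch in key:
--         if ch in forbidden:
--             return False
--     return True
-- ===== Notes on version B (the rewrite author's own statement) =====
-- stated objective: simpler
-- what changed: Replaces the four whole-key substring scans (one per forbidden character) with a single pass over the key that rejects as soon as a character lies in a forbidden set.
import Mathlib
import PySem

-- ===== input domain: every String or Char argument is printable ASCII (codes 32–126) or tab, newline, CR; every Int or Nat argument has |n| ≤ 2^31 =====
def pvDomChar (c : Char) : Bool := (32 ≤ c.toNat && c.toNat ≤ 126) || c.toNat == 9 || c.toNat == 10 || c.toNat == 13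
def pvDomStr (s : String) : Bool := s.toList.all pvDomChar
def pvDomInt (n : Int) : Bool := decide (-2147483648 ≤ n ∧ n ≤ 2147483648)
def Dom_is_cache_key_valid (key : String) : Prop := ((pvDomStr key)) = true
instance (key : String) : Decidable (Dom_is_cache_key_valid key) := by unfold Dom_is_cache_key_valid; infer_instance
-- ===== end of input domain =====

-- B replaces A's four whole-key scans (one per forbidden character) by one pass over the
-- key that rejects on the first character found in a forbidden set; objective: simpler.


-- ===== PORT A =====
-- the 'for char in invalid_chars: if char in key: return False' loop of A
def pvLoopA (chars : List Char) (key : String) : Bool :=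
  match chars with
  | [] => true
  | c :: cs => if PySem.Str.isIn (String.ofList [c]) key then false else pvLoopA cs key

def is_cache_key_valid (key : String) : Bool :=
  if key.toList = [] then false
  else if 250 < PySem.Str.len key then false
  else pvLoopA [' ', '\n', '\r', '\t'] key

-- ===== PORT B =====
def pvForbidden : PySem.Set Char := PySem.Set.ofList [' ', '\n', '\r', '\t']

-- B's single pass: 'for ch in key: if ch in forbidden: return False'
def pvLoopB (l : List Char) : Bool :=
  match l with
  | [] => true
  | c :: cs => if pvForbidden.contains c then false else pvLoopB cs

def is_cache_key_valid_alt (key : String) : Bool :=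
  if key.toList = [] then false
  else if 250 < PySem.Str.len key then false
  else pvLoopB key.toList

-- ===== PRECONDITION & SPEC =====
def Spec_is_cache_key_valid (key : String) (out : Bool) : Prop := out = is_cache_key_valid_alt key
instance (key : String) (out : Bool) : Decidable (Spec_is_cache_key_valid key out) := by unfold Spec_is_cache_key_valid; infer_instance

-- ===== CLAIM (what is proved, stated in full; the proofs are below) =====
def Claim_equal_is_cache_key_valid : Prop := ∀ (key : String), Dom_is_cache_key_valid key → Spec_is_cache_key_valid key (is_cache_key_valid key)

-- ===== LEMMAS AND PROOFS =====

theorem singleton_infix_iff_mem {c : Char} {l : List Char} : [c] <:+: l ↔ c ∈ l := by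
  constructor
  · intro h
    exact h.subset (List.mem_singleton_self c)
  · intro h
    obtain ⟨l1, l2, rfl⟩ := List.append_of_mem h
    exact ⟨l1, l2, by simp⟩

theorem isIn_singleton_iff (c : Char) (l : List Char) :
    PySem.Chars.isIn [c] l = true ↔ c ∈ l := by
  rw [PySem.Chars.isIn_iff_infix]
  exact singleton_infix_iff_mem

theorem forbidden_contains_iff (c : Char) :
    pvForbidden.contains c = true ↔ c ∈ ([' ', '\n', '\r', '\t'] : List Char) := by
  exact (PySem.Set.contains_iff pvForbidden c).trans (PySem.Set.mem_ofList [' ', '\n', '\r', '\t'] c)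

theorem loopA_eq_true_iff (chars : List Char) (key : String) :
    pvLoopA chars key = true ↔ ∀ c ∈ chars, c ∉ key.toList := by
  induction chars with
  | nil => simp [pvLoopA]
  | cons c cs ih =>
    have hb : PySem.Str.isIn (String.ofList [c]) key = PySem.Chars.isIn [c] key.toList := by
      simp
    rcases hx : PySem.Chars.isIn [c] key.toList with _ | _
    · have hc : c ∉ key.toList := fun hm => by
        rw [(isIn_singleton_iff c key.toList).mpr hm] at hx
        exact Bool.true_eq_false.mp hx
      simp [pvLoopA, hx, ih, hc]
    · have hc : c ∈ key.toList := (isIn_singleton_iff c key.toList).mp hx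
      simp only [pvLoopA, hb, hx, if_true]
      simp only [Bool.false_eq_true, false_iff]
      intro h
      exact h c (by simp) hc

theorem loopB_eq_true_iff (l : List Char) :
    pvLoopB l = true ↔ ∀ c ∈ l, c ∉ ([' ', '\n', '\r', '\t'] : List Char) := by
  induction l with
  | nil => simp [pvLoopB]
  | cons c cs ih =>
    rcases hx : pvForbidden.contains c with _ | _
    · have hc : c ∉ ([' ', '\n', '\r', '\t'] : List Char) := fun hm => by
        rw [(forbidden_contains_iff c).mpr hm] at hx
        exact Bool.true_eq_false.mp hx
      have hset : pvForbidden = ([' ', '\n', '\r', '\t'] : List Char) := by decide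
      simp only [pvLoopB, hx]
      rw [if_neg (by simp), ih]
      constructor
      · intro h c' hm
        rcases List.mem_cons.mp hm with rfl | hm'
        · exact hc
        · exact h c' hm'
      · exact fun h c' hm => h c' (List.mem_cons_of_mem c hm)
    · have hc : c ∈ ([' ', '\n', '\r', '\t'] : List Char) := (forbidden_contains_iff c).mp hx
      simp only [pvLoopB, hx, if_true]
      simp only [Bool.false_eq_true, false_iff]
      intro h
      exact h c (by simp) hc

theorem loopA_eq_loopB (key : String) :
    pvLoopA [' ', '\n', '\r', '\t'] key = pvLoopB key.toList := by
  have hiff : (∀ c ∈ ([' ', '\n', '\r', '\t'] : List Char), c ∉ key.toList) ↔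
      (∀ c ∈ key.toList, c ∉ ([' ', '\n', '\r', '\t'] : List Char)) :=
    ⟨fun h c hc hf => h c hf hc, fun h c hc hf => h c hf hc⟩
  rcases hB : pvLoopB key.toList with _ | _
  · rcases hA : pvLoopA [' ', '\n', '\r', '\t'] key with _ | _
    · rfl
    · have := (loopB_eq_true_iff key.toList).mpr (hiff.mp ((loopA_eq_true_iff _ _).mp hA))
      rw [hB] at this
      exact absurd this (by simp)
  · exact (loopA_eq_true_iff _ _).mpr (hiff.mpr ((loopB_eq_true_iff _).mp hB))

-- ===== VERDICT (by name: the statement is the Claim_ definition above) =====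
theorem is_cache_key_valid_spec : Claim_equal_is_cache_key_valid := by
  intro key _
  unfold Spec_is_cache_key_valid is_cache_key_valid is_cache_key_valid_alt
  rw [loopA_eq_loopB]
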